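-- pv_equiv track=rewrite | github.com/cainingning/leetcode | array_775.py | isIdealPermutation_timeout
-- ===== SOURCE A (Python) =====
-- def isIdealPermutation_timeout(A):
--     """
--     :type A: List[int]
--     :rtype: bool
--     """
--     local_num = 0
--     glob_num = 0
--     for i in range(0, len(A) - 1):
--         if A[i] > A[i + 1]:
--             local_num += 1
--         for j in range(i + 1, len(A)):
--             if A[i] > A[j]:
--                 glob_num += 1
--
--     return local_num == glob_num
-- ===== SOURCE B (Python) =====
-- def isIdealPermutation_timeout(A):
--     # O(n): every inversion is local iff no element exceeds one two places later;
--     # track the running max of the prefix A[0..i] and compare it with A[i+2].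
--     m = None
--     for i in range(len(A) - 2):
--         x = A[i]
--         if m is None or x > m:
--             m = x
--         if m > A[i + 2]:
--             return False
--     return True
-- ===== Notes on version B (the rewrite author's own statement) =====
-- stated objective: faster
-- what changed: Replaced the quadratic double loop counting local and global inversions with a single O(n) scan keeping the running prefix maximum and rejecting as soon as some earlier element exceeds A[i+2] (a non-adjacent inversion exists iff the counts differ).
import Mathlib
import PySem

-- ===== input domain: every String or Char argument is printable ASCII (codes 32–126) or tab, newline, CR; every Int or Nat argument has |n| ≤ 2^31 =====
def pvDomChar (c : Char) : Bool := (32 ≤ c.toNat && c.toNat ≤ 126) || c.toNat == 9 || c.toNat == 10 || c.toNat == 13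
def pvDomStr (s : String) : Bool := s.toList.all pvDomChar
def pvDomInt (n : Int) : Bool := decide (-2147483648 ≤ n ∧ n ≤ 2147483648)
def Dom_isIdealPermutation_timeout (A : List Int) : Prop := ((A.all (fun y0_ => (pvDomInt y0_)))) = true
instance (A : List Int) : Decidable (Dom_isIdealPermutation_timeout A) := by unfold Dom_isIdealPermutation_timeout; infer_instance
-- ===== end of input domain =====

-- B replaces A's O(n^2) double inversion count by one O(n) running-maximum scan; same return value.

-- ===== PORT A =====
-- counts local (adjacent) inversions and all global inversions with a nested loop, then compares
def isIdealPermutation_timeout (A : List Int) : Bool :=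
  let st := (PySem.List.pyRange 0 ((A.length : Int) - 1) 1).foldl
    (fun (s : Int × Int) i =>
      let s1 := if PySem.List.pyGetD A i 0 > PySem.List.pyGetD A (i + 1) 0 then (s.1 + 1, s.2) else s
      (PySem.List.pyRange (i + 1) (A.length : Int) 1).foldl
        (fun (t : Int × Int) j =>
          if PySem.List.pyGetD A i 0 > PySem.List.pyGetD A j 0 then (t.1, t.2 + 1) else t) s1)
    (0, 0)
  st.1 == st.2

-- ===== PORT B =====
-- the for-loop with early `return False` of Source B, as recursion over the index range
def altGo (A : List Int) (m : Option Int) : List Int → Bool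
  | [] => true
  | i :: rest =>
    let x := PySem.List.pyGetD A i 0
    let m' := match m with
      | none => x
      | some v => if x > v then x else v
    if m' > PySem.List.pyGetD A (i + 2) 0 then false else altGo A (some m') rest

def isIdealPermutation_timeout_alt (A : List Int) : Bool :=
  altGo A none (PySem.List.pyRange 0 ((A.length : Int) - 2) 1)

-- ===== PRECONDITION & SPEC =====
def Spec_isIdealPermutation_timeout (A : List Int) (out : Bool) : Prop := out = isIdealPermutation_timeout_alt A
instance (A : List Int) (out : Bool) : Decidable (Spec_isIdealPermutation_timeout A out) := by unfold Spec_isIdealPermutation_timeout; infer_instance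

-- ===== CLAIM (what is proved, stated in full; the proofs are below) =====
def Claim_equal_isIdealPermutation_timeout : Prop := ∀ (A : List Int), Dom_isIdealPermutation_timeout A → Spec_isIdealPermutation_timeout A (isIdealPermutation_timeout A)

-- ===== LEMMAS AND PROOFS =====

-- the common characterisation: no inversion with gap ≥ 2
def noFar (A : List Int) : Prop :=
  ∀ i j : Int, 0 ≤ i → i + 2 ≤ j → j < (A.length : Int) →
    PySem.List.pyGetD A i 0 ≤ PySem.List.pyGetD A j 0

-- A's inner loop only increments the second component: it adds the count of hits
lemma foldl_snd_count (A : List Int) (x : Int) (l : List Int) (s : Int × Int) :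
    l.foldl (fun t j => if x > PySem.List.pyGetD A j 0 then (t.1, t.2 + 1) else t) s
      = (s.1, s.2 + (l.countP (fun j => decide (x > PySem.List.pyGetD A j 0)) : Int)) := by
  induction l generalizing s with
  | nil => simp
  | cons y ys ih =>
    simp only [List.foldl_cons, List.countP_cons, ih]
    by_cases h : x > PySem.List.pyGetD A y 0
    · simp only [if_pos h, (by simpa using h : decide (x > PySem.List.pyGetD A y 0) = true)]
      simp only [Prod.mk.injEq, true_and]
      push_cast
      ring
    · simp only [if_neg h, (by simpa using h : decide (x > PySem.List.pyGetD A y 0) = false)]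
      simp

-- a fold whose body adds u i to the first and v i to the second component
lemma foldl_pair_add (l : List Int) (body : Int × Int → Int → Int × Int)
    (u v : Int → Int) (s : Int × Int)
    (h : ∀ s i, i ∈ l → body s i = (s.1 + u i, s.2 + v i)) :
    l.foldl body s = (s.1 + (l.map u).sum, s.2 + (l.map v).sum) := by
  induction l generalizing s with
  | nil => simp
  | cons x xs ih =>
    simp only [List.foldl_cons, List.map_cons, List.sum_cons]
    rw [h s x (by simp), ih _ (fun s i hi => h s i (by simp [hi]))]
    ring_nf

lemma sum_map_eq_zero_of_nonneg (l : List Int) (f : Int → Int)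
    (h : ∀ x ∈ l, 0 ≤ f x) : (l.map f).sum = 0 ↔ ∀ x ∈ l, f x = 0 := by
  induction l with
  | nil => simp
  | cons x xs ih =>
    have hx := h x (by simp)
    have hs : 0 ≤ (xs.map f).sum :=
      List.sum_nonneg (fun y hy => by rcases List.mem_map.mp hy with ⟨z, hz, rfl⟩; exact h z (by simp [hz]))
    have ihx := ih (fun y hy => h y (by simp [hy]))
    simp only [List.map_cons, List.sum_cons]
    constructor
    · intro h0
      have hfx : f x = 0 := by omega
      have hrest := ihx.mp (by omega)
      intro y hy
      rcases List.mem_cons.mp hy with rfl | hy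
      · exact hfx
      · exact hrest y hy
    · intro hall
      have h1 := ihx.mpr (fun y hy => hall y (by simp [hy]))
      have h2 := hall x (by simp)
      omega

def lcA (A : List Int) (i : Int) : Int :=
  if PySem.List.pyGetD A i 0 > PySem.List.pyGetD A (i + 1) 0 then 1 else 0

def fcA (A : List Int) (i : Int) : Int :=
  ((PySem.List.pyRange (i + 2) (A.length : Int) 1).countP
    (fun j => decide (PySem.List.pyGetD A i 0 > PySem.List.pyGetD A j 0)) : Int)

lemma portA_eval (A : List Int) :
    isIdealPermutation_timeout A =
      ((((PySem.List.pyRange 0 ((A.length : Int) - 1) 1).map (fun i => lcA A i)).sum) ==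
       (((PySem.List.pyRange 0 ((A.length : Int) - 1) 1).map (fun i => lcA A i + fcA A i)).sum)) := by
  simp only [isIdealPermutation_timeout]
  rw [foldl_pair_add (PySem.List.pyRange 0 ((A.length : Int) - 1) 1) _
        (fun i => lcA A i) (fun i => lcA A i + fcA A i) (0, 0) ?_]
  · simp
  · intro s i hi
    have hmem := (PySem.List.mem_pyRange_one).mp hi
    have h2 : i + 1 + 1 = i + 2 := by ring
    simp only []
    rw [PySem.List.pyRange_one_cons (show i + 1 < (A.length : Int) by omega), h2,
        List.foldl_cons, foldl_snd_count]
    by_cases hc : PySem.List.pyGetD A i 0 > PySem.List.pyGetD A (i + 1) 0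
    · simp [lcA, fcA, hc]
      omega
    · simp [lcA, fcA, hc]

lemma portA_iff (A : List Int) : isIdealPermutation_timeout A = true ↔ noFar A := by
  rw [portA_eval, beq_iff_eq]
  have hsplit : ((PySem.List.pyRange 0 ((A.length : Int) - 1) 1).map
        (fun i => lcA A i + fcA A i)).sum
      = ((PySem.List.pyRange 0 ((A.length : Int) - 1) 1).map (fun i => lcA A i)).sum
        + ((PySem.List.pyRange 0 ((A.length : Int) - 1) 1).map (fun i => fcA A i)).sum := by
    induction PySem.List.pyRange 0 ((A.length : Int) - 1) 1 with
    | nil => simp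
    | cons x xs ih => simp only [List.map_cons, List.sum_cons, ih]; ring
  rw [hsplit]
  have hnn : ∀ x ∈ PySem.List.pyRange 0 ((A.length : Int) - 1) 1, 0 ≤ fcA A x := by
    intro x _; exact Int.natCast_nonneg _
  have hzero := sum_map_eq_zero_of_nonneg (PySem.List.pyRange 0 ((A.length : Int) - 1) 1)
    (fun i => fcA A i) hnn
  constructor
  · intro h i j hi hij hj
    have hsum0 : ((PySem.List.pyRange 0 ((A.length : Int) - 1) 1).map (fun i => fcA A i)).sum = 0 := by
      omega
    have hall := hzero.mp hsum0
    have hiMem : i ∈ PySem.List.pyRange 0 ((A.length : Int) - 1) 1 :=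
      (PySem.List.mem_pyRange_one).mpr ⟨hi, by omega⟩
    have hfi : fcA A i = 0 := hall i hiMem
    have hcnt : (PySem.List.pyRange (i + 2) (A.length : Int) 1).countP
        (fun j => decide (PySem.List.pyGetD A i 0 > PySem.List.pyGetD A j 0)) = 0 := by
      simpa [fcA] using hfi
    have hjMem : j ∈ PySem.List.pyRange (i + 2) (A.length : Int) 1 :=
      (PySem.List.mem_pyRange_one).mpr ⟨hij, hj⟩
    have := List.countP_eq_zero.mp hcnt j hjMem
    simp at this
    omega
  · intro h
    have hsum0 : ((PySem.List.pyRange 0 ((A.length : Int) - 1) 1).map (fun i => fcA A i)).sum = 0 := by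
      apply hzero.mpr
      intro i hiMem
      have hib := (PySem.List.mem_pyRange_one).mp hiMem
      simp only [fcA, Int.natCast_eq_zero]
      apply List.countP_eq_zero.mpr
      intro j hjMem
      have hjb := (PySem.List.mem_pyRange_one).mp hjMem
      have := h i j (by omega) (by omega) (by omega)
      simp
      omega
    omega

-- loop invariant of B's scan: true iff the prefix maximum never beats a later element
lemma altGo_iff_aux (A : List Int) (k : Nat) :
    ∀ (a : Int) (m : Option Int), 0 ≤ a → (((A.length : Int) - 2) - a).toNat = k →
      (altGo A m (PySem.List.pyRange a ((A.length : Int) - 2) 1) = true ↔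
        ∀ j : Int, a + 2 ≤ j → j < (A.length : Int) →
          ((∀ v, m = some v → v ≤ PySem.List.pyGetD A j 0) ∧
           ∀ i : Int, a ≤ i → i + 2 ≤ j →
             PySem.List.pyGetD A i 0 ≤ PySem.List.pyGetD A j 0)) := by
  induction k with
  | zero =>
    intro a m h0 hk
    rw [PySem.List.pyRange_one_eq_nil (by omega)]
    simp only [altGo, true_iff]
    intro j hj1 hj2
    omega
  | succ k ih =>
    intro a m h0 hk
    have hab : a < (A.length : Int) - 2 := by omega
    rw [PySem.List.pyRange_one_cons hab]
    -- one step of the loop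
    cases m with
    | none =>
      simp only [altGo]
      by_cases hc : PySem.List.pyGetD A a 0 > PySem.List.pyGetD A (a + 2) 0
      · rw [if_pos hc]
        simp only [Bool.false_eq_true, false_iff]
        intro hR
        have := (hR (a + 2) (by omega) (by omega)).2 a (le_refl a) (le_refl (a + 2))
        omega
      · rw [if_neg hc]
        rw [ih (a + 1) (some (PySem.List.pyGetD A a 0)) (by omega) (by omega)]
        constructor
        · intro h j hj1 hj2
          refine ⟨(fun v hv => nomatch hv), ?_⟩
          intro i hi1 hi2
          by_cases hj3 : a + 3 ≤ j
          · by_cases hia : i = a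
            · subst hia
              exact (h j (by omega) hj2).1 _ rfl
            · exact (h j (by omega) hj2).2 i (by omega) hi2
          · have hja : j = a + 2 := by omega
            have hia : i = a := by omega
            subst hja; subst hia
            omega
        · intro h j hj1 hj2
          constructor
          · intro v hv
            injection hv with hv'
            subst hv'
            exact (h j (by omega) hj2).2 a (le_refl a) (by omega)
          · intro i hi1 hi2
            exact (h j (by omega) hj2).2 i (by omega) hi2
    | some v0 =>
      simp only [altGo]
      by_cases hm : PySem.List.pyGetD A a 0 > v0
      all_goals
        first
        | rw [if_pos hm]
        | rw [if_neg hm]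
      -- case hm true: new max is A[a]
      · by_cases hc : PySem.List.pyGetD A a 0 > PySem.List.pyGetD A (a + 2) 0
        · rw [if_pos hc]
          simp only [Bool.false_eq_true, false_iff]
          intro hR
          have := (hR (a + 2) (by omega) (by omega)).2 a (le_refl a) (le_refl (a + 2))
          omega
        · rw [if_neg hc]
          rw [ih (a + 1) (some (PySem.List.pyGetD A a 0)) (by omega) (by omega)]
          constructor
          · intro h j hj1 hj2
            by_cases hj3 : a + 3 ≤ j
            · have h1 := (h j (by omega) hj2).1 _ rfl
              refine ⟨(by intro v hv; injection hv with hv'; omega), ?_⟩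
              intro i hi1 hi2
              by_cases hia : i = a
              · subst hia; omega
              · exact (h j (by omega) hj2).2 i (by omega) hi2
            · have hja : j = a + 2 := by omega
              subst hja
              refine ⟨(by intro v hv; injection hv with hv'; omega), ?_⟩
              intro i hi1 hi2
              have hia : i = a := by omega
              subst hia; omega
          · intro h j hj1 hj2
            refine ⟨?_, ?_⟩
            · intro v hv
              injection hv with hv'
              subst hv'
              exact (h j (by omega) hj2).2 a (le_refl a) (by omega)
            · intro i hi1 hi2
              exact (h j (by omega) hj2).2 i (by omega) hi2
      -- case hm false: max stays v0
      · by_cases hc : v0 > PySem.List.pyGetD A (a + 2) 0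
        · rw [if_pos hc]
          simp only [Bool.false_eq_true, false_iff]
          intro hR
          have := (hR (a + 2) (by omega) (by omega)).1 v0 rfl
          omega
        · rw [if_neg hc]
          rw [ih (a + 1) (some v0) (by omega) (by omega)]
          constructor
          · intro h j hj1 hj2
            by_cases hj3 : a + 3 ≤ j
            · have h1 := (h j (by omega) hj2).1 v0 rfl
              refine ⟨(by intro v hv; injection hv with hv'; omega), ?_⟩
              intro i hi1 hi2
              by_cases hia : i = a
              · subst hia; omega
              · exact (h j (by omega) hj2).2 i (by omega) hi2
            · have hja : j = a + 2 := by omega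
              subst hja
              refine ⟨(by intro v hv; injection hv with hv'; omega), ?_⟩
              intro i hi1 hi2
              have hia : i = a := by omega
              subst hia; omega
          · intro h j hj1 hj2
            refine ⟨?_, ?_⟩
            · intro v hv
              injection hv with hv'
              subst hv'
              exact (h j (by omega) hj2).1 v0 rfl
            · intro i hi1 hi2
              exact (h j (by omega) hj2).2 i (by omega) hi2

lemma portB_iff (A : List Int) : isIdealPermutation_timeout_alt A = true ↔ noFar A := by
  unfold isIdealPermutation_timeout_alt
  rw [altGo_iff_aux A (((A.length : Int) - 2) - 0).toNat 0 none (le_refl 0) rfl]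
  constructor
  · intro h i j hi hij hj
    exact (h j (by omega) hj).2 i hi hij
  · intro h j hj1 hj2
    exact ⟨(fun v hv => nomatch hv), fun i hi1 hi2 => h i j hi1 hi2 hj2⟩

-- ===== VERDICT (by name: the statement is the Claim_ definition above) =====
theorem isIdealPermutation_timeout_spec : Claim_equal_isIdealPermutation_timeout := by
  intro A _
  unfold Spec_isIdealPermutation_timeout
  have ha := portA_iff A
  have hb := portB_iff A
  cases hA : isIdealPermutation_timeout A <;> cases hB : isIdealPermutation_timeout_alt A <;>
    simp_all
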